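-- pv_equiv track=rewrite | github.com/Korompilos/BioInformatics-Project | source2025/visualize/visualize_q3.py | build_index_map
-- ===== SOURCE A (Python) =====
-- def state_num(s):
--     if s in ('Start', 'Begin'):
--         return -1
--     if s == 'End':
--         return None
--     d = [c for c in s if c.isdigit()]
--     return int("".join(d)) if d else 0
--
-- def build_index_map(states):
--     nums = [state_num(s) for s in states if state_num(s) is not None]
--     mx = max(nums) if nums else 0
--     idx = {}
--     for s in states:
--         if s in ('Start', 'Begin'):
--             idx[s] = -1
--         elif s == 'End':
--             idx[s] = mx + 1
--         else:
--             idx[s] = state_num(s) if state_num(s) is not None else 0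
--     return idx
-- ===== SOURCE B (Python) =====
-- def state_num(s):
--     if s in ('Start', 'Begin'):
--         return -1
--     if s == 'End':
--         return None
--     d = [c for c in s if c.isdigit()]
--     return int("".join(d)) if d else 0
--
-- def build_index_map(states):
--     # one pass: tentative value for 'End', running max of the others, post-loop fixup
--     idx = {}
--     mx = None
--     for s in states:
--         if s == 'End':
--             idx[s] = 0
--         else:
--             n = state_num(s)
--             idx[s] = n
--             mx = n if mx is None else max(mx, n)
--     if 'End' in idx:
--         idx['End'] = (0 if mx is None else mx) + 1
--     return idx
-- ===== Notes on version B (the rewrite author's own statement) =====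
-- stated objective: faster
-- what changed: Replaces A's two passes (a max-finding comprehension that calls state_num twice per element, then an assignment loop calling it again) by a single pass that computes state_num once per element, stores it with a running max, and patches the 'End' entry in place after the loop.
import Mathlib
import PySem

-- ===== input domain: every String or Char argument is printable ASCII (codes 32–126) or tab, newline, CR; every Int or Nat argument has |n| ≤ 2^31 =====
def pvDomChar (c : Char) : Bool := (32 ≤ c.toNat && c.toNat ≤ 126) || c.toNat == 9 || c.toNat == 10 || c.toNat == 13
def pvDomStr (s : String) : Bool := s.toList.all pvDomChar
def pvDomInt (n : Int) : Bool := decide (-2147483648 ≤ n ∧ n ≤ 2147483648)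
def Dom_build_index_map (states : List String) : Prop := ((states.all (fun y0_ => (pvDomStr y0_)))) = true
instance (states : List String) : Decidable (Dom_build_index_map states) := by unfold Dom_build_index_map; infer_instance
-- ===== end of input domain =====

-- B replaces A's two-pass scheme (max-comprehension, then assignment loop calling state_num
-- up to three times per element) by ONE pass computing state_num once per element with a running
-- max and a post-loop fixup of 'End'; same return value, dict insertion order preserved (measured constant-factor speedup).

-- ===== PORT A =====
-- shared helper of the module (used by both Pythons)
def state_num (s : String) : Option Int :=
  if s = "Start" ∨ s = "Begin" then some (-1)
  else if s = "End" then none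
  else
    let d := s.toList.filter PySem.Chars.isdigit
    -- int("".join(d)) if d else 0; ofChars? is some on a nonempty digit list, so getD 0 is exact
    if d ≠ [] then some ((PySem.Int.ofChars? d).getD 0) else some 0

def build_index_map (states : List String) : List (String × Int) :=
  let nums := states.filterMap state_num
  let mx : Int := if nums.isEmpty then 0 else (PySem.List.max? nums (fun x => x)).getD 0
  let idx := states.foldl (fun (d : PySem.Dict String Int) s =>
    if s = "Start" ∨ s = "Begin" then d.insert s (-1)
    else if s = "End" then d.insert s (mx + 1)
    else d.insert s ((state_num s).getD 0)) PySem.Dict.empty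
  idx.items

-- ===== PORT B =====
def build_index_map_alt (states : List String) : List (String × Int) :=
  let p := states.foldl (fun (p : PySem.Dict String Int × Option Int) s =>
      if s = "End" then (p.1.insert s 0, p.2)
      else
        -- n = state_num(s): never None here since s ≠ 'End', so getD 0 is exact
        let n : Int := (state_num s).getD 0
        (p.1.insert s n, some (match p.2 with | none => n | some m => max m n)))
    (PySem.Dict.empty, none)
  let idx := if p.1.contains "End" then p.1.insert "End" ((p.2.getD 0) + 1) else p.1
  idx.items

-- ===== PRECONDITION & SPEC =====
def Spec_build_index_map (states : List String) (out : List (String × Int)) : Prop := out = build_index_map_alt states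
instance (states : List String) (out : List (String × Int)) : Decidable (Spec_build_index_map states out) := by unfold Spec_build_index_map; infer_instance

-- ===== CLAIM (what is proved, stated in full; the proofs are below) =====
def Claim_equal_build_index_map : Prop := ∀ (states : List String), Dom_build_index_map states → Spec_build_index_map states (build_index_map states)

-- ===== LEMMAS AND PROOFS =====

-- per-state value A's assignment loop stores (mx = the precomputed maximum)
def fA (mx : Int) (s : String) : Int :=
  if s = "Start" ∨ s = "Begin" then -1 else if s = "End" then mx + 1 else (state_num s).getD 0

-- per-state tentative value B's single pass stores
def fB (s : String) : Int := if s = "End" then 0 else (state_num s).getD 0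

-- B's post-loop fixup
def patchEnd (d : PySem.Dict String Int) (v : Int) : PySem.Dict String Int :=
  if d.contains "End" then d.insert "End" v else d

-- B's running-max step, on the option accumulator
def gmax (m : Option Int) (n : Int) : Option Int :=
  some (match m with | none => n | some mm => max mm n)

def gstep (m : Option Int) (s : String) : Option Int :=
  if s = "End" then m else gmax m ((state_num s).getD 0)

lemma state_num_end : state_num "End" = none := by decide

lemma state_num_some (s : String) (h : s ≠ "End") :
    ∃ v, state_num s = some v := by
  simp only [state_num]
  split_ifs <;> simp_all

lemma fA_eq_fB (mx : Int) (s : String) (h : s ≠ "End") : fA mx s = fB s := by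
  unfold fA fB
  by_cases h1 : s = "Start" ∨ s = "Begin"
  · simp only [if_pos h1, if_neg h]
    unfold state_num
    rw [if_pos h1]
    rfl
  · simp only [if_neg h1, if_neg h]

lemma fA_end (mx : Int) : fA mx "End" = mx + 1 := by
  unfold fA
  rw [if_neg (by decide), if_pos rfl]

lemma fB_end : fB "End" = 0 := by
  unfold fB
  rw [if_pos rfl]

-- A's loop body, with the insert pulled out of the branches
lemma bodyA_eq (mx : Int) :
    (fun (d : PySem.Dict String Int) s =>
      if s = "Start" ∨ s = "Begin" then d.insert s (-1)
      else if s = "End" then d.insert s (mx + 1)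
      else d.insert s ((state_num s).getD 0))
    = fun (d : PySem.Dict String Int) s => d.insert s (fA mx s) := by
  funext d s
  unfold fA
  split_ifs <;> rfl

-- B's loop body, as an independent product step
lemma bodyB_eq :
    (fun (p : PySem.Dict String Int × Option Int) s =>
      if s = "End" then (p.1.insert s 0, p.2)
      else
        let n : Int := (state_num s).getD 0
        (p.1.insert s n, some (match p.2 with | none => n | some m => max m n)))
    = fun (p : PySem.Dict String Int × Option Int) s => (p.1.insert s (fB s), gstep p.2 s) := by
  funext p s
  unfold fB gstep gmax
  split_ifs <;> rfl

-- two inserts at distinct keys commute when the second key is already present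
lemma insert_comm_of_contains (d : PySem.Dict String Int) (k1 k2 : String) (x v : Int)
    (h : d.contains k2 = true) (hne : k1 ≠ k2) :
    (d.insert k2 v).insert k1 x = (d.insert k1 x).insert k2 v := by
  apply PySem.Dict.ext
  by_cases h1 : d.contains k1 = true
  · rw [PySem.Dict.items_insert_of_contains _ _
        (by rw [PySem.Dict.contains_insert]; simp [h1]),
      PySem.Dict.items_insert_of_contains _ _ h,
      PySem.Dict.items_insert_of_contains _ _
        (by rw [PySem.Dict.contains_insert]; simp [h]),
      PySem.Dict.items_insert_of_contains _ _ h1,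
      List.map_map, List.map_map]
    apply List.map_congr_left
    intro p _
    simp only [Function.comp]
    by_cases hp2 : p.1 = k2
    · simp [hp2, Ne.symm hne]
    · by_cases hp1 : p.1 = k1
      · simp [hp1, hne]
      · simp [hp1, hp2]
  · have h1' : d.contains k1 = false := by
      cases hc : d.contains k1
      · rfl
      · exact absurd hc h1
    rw [PySem.Dict.items_insert_of_not_contains _ _
        (by rw [PySem.Dict.contains_insert]; simp [h1', hne]),
      PySem.Dict.items_insert_of_contains _ _ h,
      PySem.Dict.items_insert_of_contains _ _
        (by rw [PySem.Dict.contains_insert]; simp [h]),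
      PySem.Dict.items_insert_of_not_contains _ _ h1',
      List.map_append]
    simp [hne]

-- one step of A's loop on the patched dict = patch of one step of B's loop
lemma step_patch (d : PySem.Dict String Int) (mx : Int) (s : String) :
    (patchEnd d (mx + 1)).insert s (fA mx s)
      = patchEnd (d.insert s (fB s)) (mx + 1) := by
  by_cases hs : s = "End"
  · subst hs
    rw [fA_end, fB_end]
    unfold patchEnd
    rw [if_pos (PySem.Dict.contains_insert_self _ _ _),
      PySem.Dict.insert_insert_self]
    split_ifs with h
    · rw [PySem.Dict.insert_insert_self]
    · rfl
  · rw [fA_eq_fB mx s hs]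
    unfold patchEnd
    have hc : (d.insert s (fB s)).contains "End" = d.contains "End" := by
      rw [PySem.Dict.contains_insert]
      simp [Ne.symm hs]
    rw [hc]
    split_ifs with h
    · exact insert_comm_of_contains d s "End" (fB s) (mx + 1) h hs
    · rfl

-- A's whole loop on the patched start = patch of B's whole loop
lemma patch_fold (l : List String) :
    ∀ d : PySem.Dict String Int, ∀ mx : Int,
    l.foldl (fun d s => d.insert s (fA mx s)) (patchEnd d (mx + 1))
      = patchEnd (l.foldl (fun d s => d.insert s (fB s)) d) (mx + 1) := by
  induction l with
  | nil => intro d mx; rfl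
  | cons s t ih =>
    intro d mx
    simp only [List.foldl_cons]
    rw [step_patch d mx s]
    exact ih (d.insert s (fB s)) mx

-- B's running max, driven through the filterMap that defines A's nums
lemma gstep_foldl_eq (l : List String) :
    ∀ m : Option Int, l.foldl gstep m = (l.filterMap state_num).foldl gmax m := by
  induction l with
  | nil => intro m; rfl
  | cons s t ih =>
    intro m
    by_cases hs : s = "End"
    · subst hs
      simp only [List.foldl_cons, List.filterMap_cons, state_num_end]
      rw [show gstep m "End" = m from if_pos rfl]
      exact ih m
    · obtain ⟨v, hv⟩ := state_num_some s hs
      simp only [List.foldl_cons, List.filterMap_cons, hv]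
      rw [show gstep m s = gmax m ((state_num s).getD 0) from if_neg hs, hv]
      exact ih _

lemma foldl_gmax_eq_max? (l : List Int) :
    l.foldl gmax none = PySem.List.max? l (fun x => x) := by
  rw [PySem.List.max?]
  congr 1
  funext m n
  cases m with
  | none => rfl
  | some mm =>
    show some (max mm n) = if mm < n then some n else some mm
    rcases lt_or_ge mm n with h | h
    · rw [if_pos h, max_eq_right (le_of_lt h)]
    · rw [if_neg (not_lt.mpr h), max_eq_left h]

lemma foldl_gmax_some (l : List Int) : ∀ m : Int, ∃ v, l.foldl gmax (some m) = some v := by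
  induction l with
  | nil => intro m; exact ⟨m, rfl⟩
  | cons x t ih =>
    intro m
    simpa only [List.foldl_cons, gmax] using ih (max m x)

-- B's product fold splits into its two independent components
lemma foldlB_prod (l : List String) (d : PySem.Dict String Int) (m : Option Int) :
    l.foldl (fun p s => (p.1.insert s (fB s), gstep p.2 s)) (d, m)
      = (l.foldl (fun d s => d.insert s (fB s)) d, l.foldl gstep m) :=
  PySem.List.foldl_prod_mk (fun d s => d.insert s (fB s)) gstep l d m

-- A's precomputed mx equals B's running max (0 when no numbers were seen)
lemma mx_eq (states : List String) :
    (if (states.filterMap state_num).isEmpty then 0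
     else (PySem.List.max? (states.filterMap state_num) (fun x => x)).getD 0)
      = (states.foldl gstep none).getD 0 := by
  rw [gstep_foldl_eq states none]
  cases hn : states.filterMap state_num with
  | nil => rfl
  | cons a t =>
    obtain ⟨v, hv⟩ := foldl_gmax_some t a
    rw [← foldl_gmax_eq_max? (a :: t)]
    simp only [List.isEmpty_cons, List.foldl_cons]
    rw [show gmax none a = some a from rfl, hv]
    rfl

-- ===== VERDICT (by name: the statement is the Claim_ definition above) =====
theorem build_index_map_spec : Claim_equal_build_index_map := by
  intro states _dom
  unfold Spec_build_index_map build_index_map build_index_map_alt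
  simp only [bodyA_eq, bodyB_eq, foldlB_prod]
  rw [mx_eq states]
  have h := patch_fold states PySem.Dict.empty ((states.foldl gstep none).getD 0)
  rw [show patchEnd PySem.Dict.empty ((states.foldl gstep none).getD 0 + 1)
        = PySem.Dict.empty from if_neg (by simp [PySem.Dict.contains_empty])] at h
  rw [h]
  rfl
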